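-- pv_equiv track=rewrite | github.com/cholmess/breakpoint-library | breakpoint/cli/main.py | _policy_status_by_reason_code
-- ===== SOURCE A (Python) =====
-- _POLICY_DISPLAY_ORDER = ["pii", "output_contract", "cost", "latency", "drift"]
--
-- def _policy_status_by_reason_code(reason_codes: list[str]) -> dict[str, str]:
--     statuses = {policy: "ALLOW" for policy in _POLICY_DISPLAY_ORDER}
--     for code in reason_codes:
--         policy = _policy_from_reason_code(code)
--         if policy is None:
--             continue
--         severity = _severity_from_reason_code(code)
--         current = statuses.get(policy, "ALLOW")
--         if severity == "BLOCK":
--             statuses[policy] = "BLOCK"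
--         elif severity == "WARN" and current == "ALLOW":
--             statuses[policy] = "WARN"
--     return statuses
--
-- def _policy_from_reason_code(code: str) -> str | None:
--     if code.startswith("PII_"):
--         return "pii"
--     if code.startswith("OUTPUT_CONTRACT_"):
--         return "output_contract"
--     if code.startswith("COST_"):
--         return "cost"
--     if code.startswith("LATENCY_"):
--         return "latency"
--     if code.startswith("DRIFT_"):
--         return "drift"
--     return None
--
-- def _severity_from_reason_code(code: str) -> str:
--     if code.endswith("_BLOCK"):
--         return "BLOCK"
--     if code.endswith("_WARN"):
--         return "WARN"
--     return "ALLOW"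
-- ===== SOURCE B (Python) =====
-- _POLICY_DISPLAY_ORDER = ["pii", "output_contract", "cost", "latency", "drift"]
--
-- def _policy_from_reason_code(code):
--     if code.startswith("PII_"):
--         return "pii"
--     if code.startswith("OUTPUT_CONTRACT_"):
--         return "output_contract"
--     if code.startswith("COST_"):
--         return "cost"
--     if code.startswith("LATENCY_"):
--         return "latency"
--     if code.startswith("DRIFT_"):
--         return "drift"
--     return None
--
-- def _severity_from_reason_code(code):
--     if code.endswith("_BLOCK"):
--         return "BLOCK"
--     if code.endswith("_WARN"):
--         return "WARN"
--     return "ALLOW"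
--
-- def _policy_status_by_reason_code(reason_codes):
--     # phase 1: group the severities seen per policy
--     severities = {}
--     for code in reason_codes:
--         policy = _policy_from_reason_code(code)
--         if policy is not None:
--             severities.setdefault(policy, set()).add(_severity_from_reason_code(code))
--     # phase 2: reduce each policy's severity set over the display order
--     result = {}
--     for policy in _POLICY_DISPLAY_ORDER:
--         sevs = severities.get(policy, set())
--         if "BLOCK" in sevs:
--             result[policy] = "BLOCK"
--         elif "WARN" in sevs:
--             result[policy] = "WARN"
--         else:
--             result[policy] = "ALLOW"
--     return result
-- ===== Notes on version B (the rewrite author's own statement) =====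
-- stated objective: alternative
-- what changed: A updates a running per-policy status dict in place inside one loop; B first groups the severities seen per policy into sets, then a second pass over the display order reduces each set (BLOCK > WARN > ALLOW) to the final status.
import Mathlib
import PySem

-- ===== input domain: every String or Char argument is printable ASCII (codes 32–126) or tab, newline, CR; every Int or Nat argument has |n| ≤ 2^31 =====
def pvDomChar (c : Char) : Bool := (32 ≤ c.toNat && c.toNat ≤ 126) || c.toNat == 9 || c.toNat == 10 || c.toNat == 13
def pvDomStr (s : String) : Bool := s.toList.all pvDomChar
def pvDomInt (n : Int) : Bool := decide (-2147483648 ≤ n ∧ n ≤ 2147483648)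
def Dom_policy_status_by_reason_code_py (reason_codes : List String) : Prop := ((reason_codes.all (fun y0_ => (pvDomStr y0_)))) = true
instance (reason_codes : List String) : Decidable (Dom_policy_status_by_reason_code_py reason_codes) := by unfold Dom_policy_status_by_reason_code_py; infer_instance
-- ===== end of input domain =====

-- B replaces A's single-pass in-place status updating by a two-phase group-then-reduce:
-- first collect each policy's severity set, then reduce over the display order (objective: alternative).


-- ===== PORT A =====
def pvPolicyDisplayOrder : List String := ["pii", "output_contract", "cost", "latency", "drift"]

def pvPolicyFromReasonCode (code : String) : Option String :=
  if PySem.Str.startswith code "PII_" then some "pii"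
  else if PySem.Str.startswith code "OUTPUT_CONTRACT_" then some "output_contract"
  else if PySem.Str.startswith code "COST_" then some "cost"
  else if PySem.Str.startswith code "LATENCY_" then some "latency"
  else if PySem.Str.startswith code "DRIFT_" then some "drift"
  else none

def pvSeverityFromReasonCode (code : String) : String :=
  if PySem.Str.endswith code "_BLOCK" then "BLOCK"
  else if PySem.Str.endswith code "_WARN" then "WARN"
  else "ALLOW"

-- the body of A's 'for code in reason_codes' loop over the statuses dict
def pvLoopA (statuses : PySem.Dict String String) (code : String) : PySem.Dict String String :=
  match pvPolicyFromReasonCode code with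
  | none => statuses
  | some policy =>
    let severity := pvSeverityFromReasonCode code
    let current := statuses.getD policy "ALLOW"
    if severity == "BLOCK" then statuses.insert policy "BLOCK"
    else if severity == "WARN" && current == "ALLOW" then statuses.insert policy "WARN"
    else statuses

def policy_status_by_reason_code_py (reason_codes : List String) : List (String × String) :=
  let statuses := pvPolicyDisplayOrder.foldl (fun d p => d.insert p "ALLOW") PySem.Dict.empty
  (reason_codes.foldl pvLoopA statuses).items

-- ===== PORT B =====
-- B phase 1 body: severities.setdefault(policy, set()).add(_severity_from_reason_code(code))
def pvLoopB (severities : PySem.Dict String (PySem.Set String)) (code : String) :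
    PySem.Dict String (PySem.Set String) :=
  match pvPolicyFromReasonCode code with
  | none => severities
  | some policy =>
    severities.modify policy PySem.Set.empty (fun s => PySem.Set.add s (pvSeverityFromReasonCode code))

def policy_status_by_reason_code_py_alt (reason_codes : List String) : List (String × String) :=
  let severities := reason_codes.foldl pvLoopB PySem.Dict.empty
  let result := pvPolicyDisplayOrder.foldl (fun r policy =>
    let sevs := severities.getD policy PySem.Set.empty
    if PySem.Set.contains sevs "BLOCK" then r.insert policy "BLOCK"
    else if PySem.Set.contains sevs "WARN" then r.insert policy "WARN"
    else r.insert policy "ALLOW") PySem.Dict.empty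
  result.items

-- ===== PRECONDITION & SPEC =====
def Spec_policy_status_by_reason_code_py (reason_codes : List String) (out : List (String × String)) : Prop := out = policy_status_by_reason_code_py_alt reason_codes
instance (reason_codes : List String) (out : List (String × String)) : Decidable (Spec_policy_status_by_reason_code_py reason_codes out) := by unfold Spec_policy_status_by_reason_code_py; infer_instance

-- ===== CLAIM (what is proved, stated in full; the proofs are below) =====
def Claim_equal_policy_status_by_reason_code_py : Prop := ∀ (reason_codes : List String), Dom_policy_status_by_reason_code_py reason_codes → Spec_policy_status_by_reason_code_py reason_codes (policy_status_by_reason_code_py reason_codes)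

-- ===== LEMMAS AND PROOFS =====

-- pvHas codes p s: some code in codes targets policy p with severity s
def pvHas (codes : List String) (p s : String) : Bool :=
  codes.any (fun c => pvPolicyFromReasonCode c == some p && pvSeverityFromReasonCode c == s)

-- A's final status for policy p, starting from current value a
def pvUpd (codes : List String) (p a : String) : String :=
  if pvHas codes p "BLOCK" then "BLOCK"
  else if a == "ALLOW" && pvHas codes p "WARN" then "WARN" else a

lemma pvSev_cases (x : String) : pvSeverityFromReasonCode x = "BLOCK" ∨
    pvSeverityFromReasonCode x = "WARN" ∨ pvSeverityFromReasonCode x = "ALLOW" := by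
  unfold pvSeverityFromReasonCode; split_ifs <;> simp

lemma pvPol_mem (x p : String) (h : pvPolicyFromReasonCode x = some p) :
    p ∈ pvPolicyDisplayOrder := by
  unfold pvPolicyFromReasonCode at h
  split_ifs at h <;> simp_all [pvPolicyDisplayOrder]

-- A's loop, observed through getD at any key p
lemma pvLoopA_getD (codes : List String) (st : PySem.Dict String String) (p : String) :
    (codes.foldl pvLoopA st).getD p "ALLOW" = pvUpd codes p (st.getD p "ALLOW") := by
  induction codes generalizing st with
  | nil => simp [pvUpd, pvHas]
  | cons x xs ih =>
    rw [List.foldl_cons, ih]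
    cases hpol : pvPolicyFromReasonCode x with
    | none => simp [pvLoopA, hpol, pvUpd, pvHas]
    | some q =>
      rcases pvSev_cases x with hsev | hsev | hsev <;>
        simp only [pvLoopA, hpol, hsev] <;> by_cases hpq : p = q
      · -- BLOCK, p = q
        subst hpq
        simp [pvUpd, pvHas, hpol, hsev]
      · -- BLOCK, p ≠ q
        simp [pvUpd, pvHas, hpol, hsev, PySem.Dict.getD_insert, hpq, Ne.symm hpq]
      · -- WARN, p = q
        subst hpq
        by_cases hcur : st.getD p "ALLOW" = "ALLOW" <;>
          simp [pvUpd, pvHas, hpol, hsev, hcur]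
      · -- WARN, p ≠ q
        by_cases hcur : st.getD q "ALLOW" = "ALLOW" <;>
          simp [pvUpd, pvHas, hpol, hsev, PySem.Dict.getD_insert, hpq, Ne.symm hpq, hcur]
      · -- ALLOW, p = q
        subst hpq
        simp [pvUpd, pvHas, hpol, hsev]
      · -- ALLOW, p ≠ q
        simp [pvUpd, pvHas, hpol, hsev]

-- A's loop never adds or removes keys when every policy is already a key
lemma pvLoopA_keys (codes : List String) (st : PySem.Dict String String)
    (h : ∀ p ∈ pvPolicyDisplayOrder, st.contains p = true) :
    (codes.foldl pvLoopA st).keys = st.keys := by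
  induction codes generalizing st with
  | nil => rfl
  | cons x xs ih =>
    rw [List.foldl_cons]
    have hkeys : (pvLoopA st x).keys = st.keys := by
      cases hpol : pvPolicyFromReasonCode x with
      | none => simp [pvLoopA, hpol]
      | some q =>
        have hq := h q (pvPol_mem x q hpol)
        simp only [pvLoopA, hpol]
        split_ifs <;> simp [PySem.Dict.keys_insert_of_contains, hq]
    rw [ih (pvLoopA st x) (fun p hp => ?_), hkeys]
    have := h p hp
    rw [PySem.Dict.contains_iff_mem_keys] at this ⊢
    rw [hkeys]; exact this

-- a dict whose key list is exactly the five policies has these items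
lemma pvItems5 (d : PySem.Dict String String)
    (h : d.keys = pvPolicyDisplayOrder) :
    d.items = pvPolicyDisplayOrder.map (fun p => (p, d.getD p "ALLOW")) := by
  have hnodup : d.keys.Nodup := by rw [h]; decide
  have hmap : d.items.map Prod.fst = pvPolicyDisplayOrder := h
  rcases hit : d.items with _ | ⟨⟨k1, v1⟩, _ | ⟨⟨k2, v2⟩, _ | ⟨⟨k3, v3⟩, _ | ⟨⟨k4, v4⟩,
      _ | ⟨⟨k5, v5⟩, rest⟩⟩⟩⟩⟩ <;>
    rw [hit] at hmap <;> simp [pvPolicyDisplayOrder] at hmap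
  obtain ⟨rfl, rfl, rfl, rfl, rfl, hrest⟩ := hmap
  have hrest' : rest = [] := by cases rest with | nil => rfl | cons a t => simp at hrest
  subst hrest'
  have hg : ∀ k v, (k, v) ∈ d.items → d.getD k "ALLOW" = v := fun k v hm =>
    PySem.Dict.getD_of_mem_items d hm hnodup "ALLOW"
  simp only [pvPolicyDisplayOrder, List.map]
  rw [hg "pii" v1 (by rw [hit]; simp), hg "output_contract" v2 (by rw [hit]; simp),
      hg "cost" v3 (by rw [hit]; simp), hg "latency" v4 (by rw [hit]; simp),
      hg "drift" v5 (by rw [hit]; simp)]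

-- B phase 1, observed through membership of any severity s at any key p
lemma pvLoopB_mem (codes : List String) (d : PySem.Dict String (PySem.Set String))
    (p s : String) :
    s ∈ (codes.foldl pvLoopB d).getD p PySem.Set.empty ↔
      (pvHas codes p s = true ∨ s ∈ d.getD p PySem.Set.empty) := by
  induction codes generalizing d with
  | nil => simp [pvHas]
  | cons x xs ih =>
    rw [List.foldl_cons, ih]
    cases hpol : pvPolicyFromReasonCode x with
    | none => simp [pvLoopB, hpol, pvHas]
    | some q =>
      by_cases hpq : p = q
      · subst hpq
        simp only [pvLoopB, hpol]
        rw [PySem.Dict.getD_modify_self d p PySem.Set.empty]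
        simp [pvHas, hpol, PySem.Set.mem_add]
        aesop
      · simp [pvLoopB, hpol, pvHas, PySem.Dict.getD_modify, hpq, Ne.symm hpq]

-- B phase 2 folds as an insert of the combined status
def pvComb (sevs : PySem.Set String) : String :=
  if PySem.Set.contains sevs "BLOCK" then "BLOCK"
  else if PySem.Set.contains sevs "WARN" then "WARN" else "ALLOW"

lemma pvPhase2_insert (sev : PySem.Dict String (PySem.Set String))
    (r : PySem.Dict String String) (policy : String) :
    (if PySem.Set.contains (sev.getD policy PySem.Set.empty) "BLOCK" then r.insert policy "BLOCK"
     else if PySem.Set.contains (sev.getD policy PySem.Set.empty) "WARN" then r.insert policy "WARN"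
     else r.insert policy "ALLOW") =
    r.insert policy (pvComb (sev.getD policy PySem.Set.empty)) := by
  unfold pvComb; split_ifs <;> rfl

-- ===== VERDICT (by name: the statement is the Claim_ definition above) =====
theorem policy_status_by_reason_code_py_spec : Claim_equal_policy_status_by_reason_code_py := by
  intro codes _
  unfold Spec_policy_status_by_reason_code_py
  unfold policy_status_by_reason_code_py policy_status_by_reason_code_py_alt
  simp only []
  -- A's side: keys stay the five policies, items recovered from getD
  have hinit : (pvPolicyDisplayOrder.foldl (fun d p => d.insert p "ALLOW") PySem.Dict.empty) =
      PySem.Dict.mk [("pii", "ALLOW"), ("output_contract", "ALLOW"), ("cost", "ALLOW"),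
        ("latency", "ALLOW"), ("drift", "ALLOW")] := by decide
  rw [hinit]
  have hkeys : (codes.foldl pvLoopA (PySem.Dict.mk [("pii", "ALLOW"),
      ("output_contract", "ALLOW"), ("cost", "ALLOW"), ("latency", "ALLOW"),
      ("drift", "ALLOW")])).keys = pvPolicyDisplayOrder := by
    rw [pvLoopA_keys _ _ (by decide)]; rfl
  rw [pvItems5 _ hkeys]
  -- B's side: phase 2 is a fold of fresh inserts over the five distinct policies
  rw [PySem.List.foldl_congr_mem pvPolicyDisplayOrder _ _ PySem.Dict.empty
        (fun r p _ => pvPhase2_insert (codes.foldl pvLoopB PySem.Dict.empty) r p)]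
  rw [PySem.Dict.items_foldl_insert_fresh pvPolicyDisplayOrder (fun p => p)
        (fun p => pvComb ((codes.foldl pvLoopB PySem.Dict.empty).getD p PySem.Set.empty))
        PySem.Dict.empty (fun p _ => by rfl) (by decide)]
  simp only [PySem.Dict.empty, List.nil_append]
  -- componentwise equality over the display order
  apply List.map_congr_left
  intro p hp
  have hA := pvLoopA_getD codes (PySem.Dict.mk [("pii", "ALLOW"), ("output_contract", "ALLOW"),
    ("cost", "ALLOW"), ("latency", "ALLOW"), ("drift", "ALLOW")]) p
  have hinit_get : (PySem.Dict.mk [("pii", "ALLOW"), ("output_contract", "ALLOW"),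
      ("cost", "ALLOW"), ("latency", "ALLOW"), ("drift", "ALLOW")]).getD p "ALLOW" = "ALLOW" := by
    fin_cases hp <;> rfl
  rw [hA, hinit_get]
  have hB := fun s => pvLoopB_mem codes PySem.Dict.empty p s
  simp only [PySem.Dict.getD_empty] at hB
  simp only [pvUpd, pvComb]
  split_ifs <;> simp_all [PySem.Dict.empty]
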